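-- pv_equiv track=rewrite | github.com/Lep333/adventofcode2024 | src/day25.py | element_to_height
-- ===== SOURCE A (Python) =====
-- def element_to_height(input: list[str]) -> list[int]:
--     heights = []
--     for x in range(len(input[0])):
--         height = 0
--         for y in range(1, len(input) - 1):
--             if input[y][x] == "#":
--                 height += 1
--         heights.append(height)
--     return heights
-- ===== SOURCE B (Python) =====
-- def element_to_height(input: list[str]) -> list[int]:
--     w = len(input[0])
--     marks = [x for row in input[1:-1] for x, ch in enumerate(row) if ch == "#"]
--     cnt = {}
--     for x in marks:
--         cnt[x] = cnt.get(x, 0) + 1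
--     return [cnt.get(x, 0) for x in range(w)]
-- ===== Notes on version B (the rewrite author's own statement) =====
-- stated objective: alternative
-- what changed: B replaces A's nested per-column rescan by a flat index: it collects the column indices of all '#' cells of the interior rows into one list, builds a dictionary counter over it in one pass, and reads the answer off by dictionary lookup per column.
import Mathlib
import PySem

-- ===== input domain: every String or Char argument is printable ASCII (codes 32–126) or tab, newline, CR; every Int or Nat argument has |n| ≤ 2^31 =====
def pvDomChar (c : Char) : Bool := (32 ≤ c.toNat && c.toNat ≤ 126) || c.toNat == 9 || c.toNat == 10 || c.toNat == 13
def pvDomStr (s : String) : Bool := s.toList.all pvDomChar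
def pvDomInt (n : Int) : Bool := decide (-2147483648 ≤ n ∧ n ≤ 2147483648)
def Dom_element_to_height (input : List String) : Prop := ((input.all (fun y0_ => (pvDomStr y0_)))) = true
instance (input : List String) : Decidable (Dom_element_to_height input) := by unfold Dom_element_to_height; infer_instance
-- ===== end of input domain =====

-- B builds a dictionary counter over the flat list of '#' column positions and answers by lookup, instead of A's per-column rescan of all interior rows (alternative decomposition, same cost).


-- ===== PORT A =====
-- input[y][x] for in-range indices (Pre_ guarantees the indices used are in range, so the default is never taken)
def pvCharAt (input : List String) (y x : Nat) : Char := ((input.getD y "").toList.getD x ' ')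

def element_to_height (input : List String) : List Int :=
  (List.range (input.headD "").length).foldl
    (fun heights x =>
      heights ++ [(List.range' 1 (input.length - 2)).foldl
        (fun height y => if pvCharAt input y x = '#' then height + 1 else height) (0 : Int)])
    []

-- ===== PORT B =====
-- marks = [x for row in input[1:-1] for x, ch in enumerate(row) if ch == "#"]
def pvMarks (rows : List String) : List Int :=
  rows.flatMap
    (fun row => ((PySem.List.enumerate row.toList 0).filter (fun p => p.2 == '#')).map (·.1))

def element_to_height_alt (input : List String) : List Int :=
  let w : Nat := (input.headD "").length
  let marks : List Int := pvMarks ((input.drop 1).dropLast)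
  let cnt : PySem.Dict Int Int :=
    marks.foldl (fun d x => d.modify x 0 (· + 1)) PySem.Dict.empty
  (PySem.List.pyRange 0 (w : Int) 1).map (fun x => cnt.getD x 0)

-- ===== PRECONDITION & SPEC =====
-- Pre_ excludes exactly the inputs where the Python A raises IndexError: the empty list (input[0])
-- and ragged inputs where some interior row is shorter than the first row (input[y][x]).
def Pre_element_to_height (input : List String) : Prop :=
  input ≠ [] ∧ ∀ row ∈ (input.drop 1).dropLast, (input.headD "").length ≤ row.length
instance (input : List String) : Decidable (Pre_element_to_height input) := by
  unfold Pre_element_to_height; infer_instance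
def pvWitness_element_to_height : List String := ["#####", "..#..", "#.#.#", "#####"]

def Spec_element_to_height (input : List String) (out : List Int) : Prop := out = element_to_height_alt input
instance (input : List String) (out : List Int) : Decidable (Spec_element_to_height input out) := by unfold Spec_element_to_height; infer_instance

-- ===== CLAIM (what is proved, stated in full; the proofs are below) =====
def Claim_equal_element_to_height : Prop := ∀ (input : List String), Dom_element_to_height input → Pre_element_to_height input → Spec_element_to_height input (element_to_height input)

-- ===== LEMMAS AND PROOFS =====

-- the column count over a list of rows
def pvCnt (rows : List String) (x : Nat) : Int :=
  rows.foldl (fun h r => if r.toList.getD x ' ' = '#' then h + 1 else h) 0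

theorem pvFoldl_append_map {α β : Type} (g : α → β) (l : List α) (acc : List β) :
    l.foldl (fun hs x => hs ++ [g x]) acc = acc ++ l.map g := by
  induction l generalizing acc with
  | nil => simp
  | cons a l ih => simp [ih]

theorem pvCnt_shift (rows : List String) (x : Nat) (c : Int) :
    rows.foldl (fun h r => if r.toList.getD x ' ' = '#' then h + 1 else h) c
      = c + pvCnt rows x := by
  induction rows generalizing c with
  | nil => simp [pvCnt]
  | cons r rows ih =>
      rw [List.foldl_cons, ih]
      conv_rhs => rw [pvCnt, List.foldl_cons, ih]
      split <;> ring

-- A's inner fold over y-indices equals the fold over the interior rows themselves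
theorem pvInner_eq (input : List String) (x : Nat) (s n : Nat) (c : Int)
    (h : s + n ≤ input.length) :
    (List.range' s n).foldl
        (fun h y => if pvCharAt input y x = '#' then h + 1 else h) c
      = ((input.drop s).take n).foldl
        (fun h r => if r.toList.getD x ' ' = '#' then h + 1 else h) c := by
  induction n generalizing s c with
  | zero => simp
  | succ n ih =>
      have hs : s < input.length := by omega
      have hdrop : input.drop s = input[s] :: input.drop (s + 1) :=
        List.drop_eq_getElem_cons hs
      rw [List.range'_succ, hdrop]
      simp only [List.take_succ_cons, List.foldl_cons]
      rw [ih (s + 1) _ (by omega)]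
      congr 1
      simp [pvCharAt, List.getD, List.getElem?_eq_getElem hs]

theorem pvA_eq (input : List String) :
    element_to_height input
      = (List.range (input.headD "").length).map (fun x => pvCnt ((input.drop 1).dropLast) x) := by
  rw [element_to_height, pvFoldl_append_map, List.nil_append]
  apply List.map_congr_left
  intro x _
  rcases input with _ | ⟨a, l⟩
  · simp [pvCnt]
  · rw [pvInner_eq (a :: l) x 1 ((a :: l).length - 2) 0 (by simp; omega)]
    have ht : ((a :: l).drop 1).take ((a :: l).length - 2) = ((a :: l).drop 1).dropLast := by
      rw [List.dropLast_eq_take]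
      simp
    rw [ht, ← pvCnt]

-- indices below the enumerate start never occur among the marked positions
theorem pvEnumCount_lt (l : List Char) (s x : Int) (hx : x < s) :
    (((PySem.List.enumerate l s).filter (fun p => p.2 == '#')).map (·.1)).count x = 0 := by
  rw [List.count_eq_zero]
  intro hmem
  simp only [List.mem_map, List.mem_filter] at hmem
  obtain ⟨p, ⟨hp, _⟩, hx1⟩ := hmem
  rw [PySem.List.mem_enumerate_iff] at hp
  obtain ⟨j, hj, rfl⟩ := hp
  simp at hx1
  omega

-- one row contributes its marked position x at most once, exactly when row[x] = '#'
theorem pvEnumCount (l : List Char) (s : Int) (k : Nat) (hk : k < l.length) :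
    (((PySem.List.enumerate l s).filter (fun p => p.2 == '#')).map (·.1)).count (s + k)
      = if l.getD k ' ' = '#' then 1 else 0 := by
  induction l generalizing s k with
  | nil => simp at hk
  | cons c l ih =>
      rw [PySem.List.enumerate_cons]
      by_cases hc : c = '#'
      · subst hc
        simp only [List.filter_cons, beq_self_eq_true, if_true, List.map_cons, List.count_cons]
        cases k with
        | zero =>
            have h0 : (s + (0 : Nat)) = s := by omega
            rw [h0, pvEnumCount_lt l (s + 1) s (by omega)]
            simp
        | succ j =>
            have hne : ((s : Int) == s + (j + 1 : Nat)) = false := by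
              simp; omega
            have harith : (s + (j + 1 : Nat) : Int) = (s + 1) + (j : Nat) := by push_cast; ring
            rw [hne, harith, ih (s + 1) j (by simpa using hk)]
            simp [List.getD]
      · have hcf : (c == '#') = false := by simpa using hc
        simp only [List.filter_cons, hcf, Bool.false_eq_true, if_false]
        cases k with
        | zero =>
            have h0 : (s + (0 : Nat)) = s := by omega
            rw [h0, pvEnumCount_lt l (s + 1) s (by omega)]
            simp [List.getD, hc]
        | succ j =>
            have harith : (s + (j + 1 : Nat) : Int) = (s + 1) + (j : Nat) := by push_cast; ring
            rw [harith, ih (s + 1) j (by simpa using hk)]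
            simp [List.getD]

theorem pvMarks_count (rows : List String) (k : Nat)
    (hlen : ∀ row ∈ rows, k < row.toList.length) :
    (pvMarks rows).count (k : Int) = pvCnt rows k := by
  induction rows with
  | nil => simp [pvMarks, pvCnt]
  | cons r rows ih =>
      have hr := pvEnumCount r.toList 0 k (hlen r (List.mem_cons_self ..))
      rw [zero_add] at hr
      have h2 : ((((PySem.List.enumerate r.toList 0).filter (fun p => p.2 == '#')).map (·.1)).count (k : Int) : Int)
          = if r.toList.getD k ' ' = '#' then 1 else 0 := by
        rw [hr]; split <;> simp
      rw [pvMarks, List.flatMap_cons, List.count_append, ← pvMarks]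
      push_cast
      rw [ih (fun row hm => hlen row (List.mem_cons_of_mem _ hm)), h2]
      conv_rhs => rw [pvCnt, List.foldl_cons, pvCnt_shift]
      split <;> ring

theorem pvB_eq (input : List String)
    (hlen : ∀ row ∈ (input.drop 1).dropLast, (input.headD "").length ≤ row.length) :
    element_to_height_alt input
      = (List.range (input.headD "").length).map (fun x => pvCnt ((input.drop 1).dropLast) x) := by
  rw [element_to_height_alt]
  simp only [PySem.List.pyRange_one, Int.sub_zero, Int.toNat_natCast, List.map_map]
  apply List.map_congr_left
  intro k hk
  have hk' : k < (input.headD "").length := List.mem_range.mp hk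
  simp only [Function.comp_apply, Int.zero_add]
  rw [PySem.Dict.getD_foldl_modify_add_one, PySem.Dict.getD_empty, Int.zero_add]
  exact pvMarks_count _ k (fun row hm => by
    have h := hlen row hm
    rw [String.length_toList]
    omega)

-- ===== VERDICT (by name: the statement is the Claim_ definition above) =====
theorem element_to_height_spec : Claim_equal_element_to_height := by
  intro input _ hpre
  unfold Spec_element_to_height
  rw [pvA_eq, pvB_eq input hpre.2]
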